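-- pv_equiv track=rewrite | github.com/OscarAzrak/Applied-Computer-Science | Labb C/LabbC.py | hashcount
-- ===== SOURCE A (Python) =====
-- def hashfunction(row,n):
--     h = ''
--     for elem in row:
--         val = ord(elem)
--         h = h + str(val)
--     return int(h) % n
--
-- def hashcount(listan,n):
--     hashdic = {}
--     count = 0
--     for row in listan:
--         keyvalue = hashfunction(row,n)
--         if keyvalue in hashdic:
--             count += 1
--         else:
--             hashdic[keyvalue] = row
--     return count
-- ===== SOURCE B (Python) =====
-- def hashfunction(row,n):
--     h = ''
--     for elem in row:
--         val = ord(elem)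
--         h = h + str(val)
--     return int(h) % n
--
-- def hashcount(listan,n):
--     hs = sorted(hashfunction(row, n) for row in listan)
--     dup = 0
--     for prev, cur in zip(hs, hs[1:]):
--         if prev == cur:
--             dup += 1
--     return dup
-- ===== Notes on version B (the rewrite author's own statement) =====
-- stated objective: alternative
-- what changed: Replaces the incremental seen-dict/if-else/counter by sort-then-scan: sort all row hashes and count adjacent equal pairs, using no dict or set at all.
import Mathlib
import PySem

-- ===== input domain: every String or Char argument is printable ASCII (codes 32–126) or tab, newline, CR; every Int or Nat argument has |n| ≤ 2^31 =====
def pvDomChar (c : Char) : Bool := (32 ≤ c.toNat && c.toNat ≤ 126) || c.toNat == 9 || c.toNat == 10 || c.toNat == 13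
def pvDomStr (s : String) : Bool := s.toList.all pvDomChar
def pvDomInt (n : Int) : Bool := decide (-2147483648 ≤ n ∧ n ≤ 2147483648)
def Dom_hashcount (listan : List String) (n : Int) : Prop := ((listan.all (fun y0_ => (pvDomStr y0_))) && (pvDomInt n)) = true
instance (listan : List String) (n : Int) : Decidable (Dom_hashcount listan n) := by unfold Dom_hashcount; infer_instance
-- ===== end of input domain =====

-- B replaces A's incremental seen-dict/counter by sort-then-scan: sort all row hashes and count adjacent equal pairs; a different algorithm of similar cost.


-- ===== PORT A =====
-- shared helper (Source B keeps hashfunction byte-for-byte): builds the decimal string of char codes,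
-- int(h) via PySem.Int.ofChars? (getD 0 is unreachable under Pre_: the row is nonempty so h is a
-- nonempty digit string), then Python '%' via PySem.Int.mod (n = 0, where Python raises, is excluded by Pre_).
def hashfunction (row : String) (n : Int) : Int :=
  let h : List Char := row.toList.foldl (fun h elem => h ++ (PySem.Int.toStr (elem.toNat : Int)).toList) []
  PySem.Int.mod ((PySem.Int.ofChars? h).getD 0) n

def hashcount (listan : List String) (n : Int) : Int :=
  (listan.foldl
    (fun (st : PySem.Dict Int String × Int) row =>
      let keyvalue := hashfunction row n
      if st.1.contains keyvalue then (st.1, st.2 + 1)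
      else (st.1.insert keyvalue row, st.2))
    (PySem.Dict.empty, 0)).2

-- ===== PORT B =====
-- Source B: hs = sorted(hashes); then count adjacent equal pairs via zip(hs, hs[1:]).
-- hs[1:] is hs.tail (exact: PySem.List.slice hs 1 len = tail for any list).
def hashcount_alt (listan : List String) (n : Int) : Int :=
  let hs : List Int := PySem.List.sorted (listan.map (fun row => hashfunction row n)) (fun x => x) false
  (hs.zip hs.tail).foldl (fun dup p => if p.1 == p.2 then dup + 1 else dup) 0

-- ===== PRECONDITION & SPEC =====
-- Pre_ excludes exactly the inputs where Python A raises: n = 0 with at least one row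
-- (ZeroDivisionError in '%'; with no rows '%' is never evaluated) and any empty row (int('') is a ValueError).
def Pre_hashcount (listan : List String) (n : Int) : Prop := (listan = [] ∨ n ≠ 0) ∧ ∀ s ∈ listan, s ≠ ""
instance (listan : List String) (n : Int) : Decidable (Pre_hashcount listan n) := by unfold Pre_hashcount; infer_instance
def pvWitness_hashcount : List String × Int := (["ab", "c", "ab"], 7)

def Spec_hashcount (listan : List String) (n : Int) (out : Int) : Prop := out = hashcount_alt listan n
instance (listan : List String) (n : Int) (out : Int) : Decidable (Spec_hashcount listan n out) := by unfold Spec_hashcount; infer_instance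

-- ===== CLAIM (what is proved, stated in full; the proofs are below) =====
def Claim_equal_hashcount : Prop := ∀ (listan : List String) (n : Int), Dom_hashcount listan n → Pre_hashcount listan n → Spec_hashcount listan n (hashcount listan n)

-- ===== LEMMAS AND PROOFS =====

-- A's loop, with the dict's keys generalized: the final count is
-- c + |l| + |d.keys| - |d.keys updated with the hashes of l|.
theorem hashcount_loop_eq (n : Int) (l : List String) (d : PySem.Dict Int String) (c : Int) :
    (l.foldl
      (fun (st : PySem.Dict Int String × Int) row =>
        let keyvalue := hashfunction row n
        if st.1.contains keyvalue then (st.1, st.2 + 1)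
        else (st.1.insert keyvalue row, st.2))
      (d, c)).2
      = c + (l.length : Int) + (d.keys.length : Int)
          - ((PySem.Set.update d.keys (l.map (fun row => hashfunction row n))).length : Int) := by
  induction l generalizing d c with
  | nil => simp [PySem.Set.update]
  | cons r t ih =>
    simp only [List.foldl_cons, List.map_cons]
    by_cases h : d.contains (hashfunction r n)
    · have hmem : hashfunction r n ∈ d.keys := (PySem.Dict.contains_iff_mem_keys d _).mp h
      have hadd : PySem.Set.add d.keys (hashfunction r n) = d.keys := by
        simp [PySem.Set.add]
        exact hmem
      rw [if_pos h, ih]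
      rw [show PySem.Set.update d.keys (hashfunction r n :: t.map (fun row => hashfunction row n))
            = PySem.Set.update (PySem.Set.add d.keys (hashfunction r n)) (t.map (fun row => hashfunction row n)) from rfl,
          hadd]
      push_cast [List.length_cons]; ring
    · have hmem : hashfunction r n ∉ d.keys :=
        fun hm => h ((PySem.Dict.contains_iff_mem_keys d _).mpr hm)
      have hadd : PySem.Set.add d.keys (hashfunction r n) = d.keys ++ [hashfunction r n] := by
        simp [PySem.Set.add]
        exact hmem
      rw [if_neg h, ih]
      rw [show PySem.Set.update d.keys (hashfunction r n :: t.map (fun row => hashfunction row n))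
            = PySem.Set.update (PySem.Set.add d.keys (hashfunction r n)) (t.map (fun row => hashfunction row n)) from rfl,
          hadd, PySem.Dict.keys_insert_of_not_contains d r (by simpa using h)]
      push_cast [List.length_append, List.length_cons, List.length_nil]; ring

-- the adjacent-equal count of B's scan, as a structural recursion
def adjCount : List Int → Nat
  | [] => 0
  | [_] => 0
  | a :: b :: t => (if a = b then 1 else 0) + adjCount (b :: t)

-- B's fold over zip(hs, hs[1:]) computes adjCount
theorem foldl_zip_eq_adjCount (s : List Int) (c : Int) :
    (s.zip s.tail).foldl (fun dup p => if p.1 == p.2 then dup + 1 else dup) c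
      = c + (adjCount s : Int) := by
  induction s generalizing c with
  | nil => simp [adjCount]
  | cons a t ih =>
    cases t with
    | nil => simp [adjCount]
    | cons b u =>
      simp only [List.tail_cons, List.zip_cons_cons, List.foldl_cons]
      rw [show (b :: u).tail = u from rfl] at ih
      by_cases hab : a = b
      · simp only [hab, beq_self_eq_true, if_true, ih, adjCount]
        push_cast; ring
      · have hbeq : (a == b) = false := beq_eq_false_iff_ne.mpr hab
        simp only [hbeq, Bool.false_eq_true, if_false, ih, adjCount, if_neg hab]
        push_cast; ring

-- on a sorted list, adjacent duplicates = length − number of distinct elements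
theorem adjCount_of_sorted (s : List Int) (hs : s.Pairwise (· ≤ ·)) :
    (adjCount s : Int) = (s.length : Int) - (s.toFinset.card : Int) := by
  induction s with
  | nil => simp [adjCount]
  | cons a t ih =>
    cases t with
    | nil => simp [adjCount]
    | cons b u =>
      have hs' : (b :: u).Pairwise (· ≤ ·) := hs.tail
      have hab : a ≤ b := (List.pairwise_cons.mp hs).1 b (by simp)
      have hcard_le : (b :: u).toFinset.card ≤ (b :: u).length := List.toFinset_card_le _
      have ih' := ih hs'
      by_cases h : a = b
      · have hfin : (a :: b :: u).toFinset = (b :: u).toFinset := by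
          subst h; rw [List.toFinset_cons, List.toFinset_cons, Finset.insert_idem]
        simp only [adjCount, if_pos h, hfin]
        push_cast
        rw [List.length_cons (a := a)]
        push_cast at ih' ⊢
        omega
      · have hnotmem : a ∉ (b :: u).toFinset := by
          simp only [List.mem_toFinset, List.mem_cons]
          rintro (rfl | hmem)
          · exact h rfl
          · have hba : b ≤ a := (List.pairwise_cons.mp hs').1 a hmem
            exact h (le_antisymm hab hba)
        have hfin : (a :: b :: u).toFinset.card = (b :: u).toFinset.card + 1 := by
          rw [List.toFinset_cons]
          exact Finset.card_insert_of_notMem (by simpa using hnotmem)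
        simp only [adjCount, if_neg h]
        push_cast
        rw [List.length_cons (a := a)]
        push_cast at ih' hfin ⊢
        omega

-- a PySem.Set built from a list has as many elements as the list has distinct values
theorem length_ofList_eq_card (l : List Int) :
    (PySem.Set.ofList l).length = l.toFinset.card := by
  have hnd : (PySem.Set.ofList l).Nodup := PySem.Set.nodup_ofList l
  have hfin : (PySem.Set.ofList l).toFinset = l.toFinset := by
    ext x; simp [PySem.Set.mem_ofList]
  rw [← List.toFinset_card_of_nodup hnd, hfin]

-- ===== VERDICT (by name: the statement is the Claim_ definition above) =====
theorem hashcount_spec : Claim_equal_hashcount := by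
  intro listan n _ _
  unfold Spec_hashcount hashcount hashcount_alt
  rw [hashcount_loop_eq]
  set hl := listan.map (fun row => hashfunction row n) with hhl
  have hupd : PySem.Set.update (PySem.Dict.empty : PySem.Dict Int String).keys hl
      = PySem.Set.ofList hl := rfl
  set s := PySem.List.sorted hl (fun x => x) false with hss
  have hperm : s.Perm hl := PySem.List.sorted_perm hl (fun x => x) false
  have hsorted : s.Pairwise (· ≤ ·) := by
    simpa using PySem.List.sorted_pairwise hl (fun x => x)
  have hfin : s.toFinset = hl.toFinset := by
    ext x; simp [List.mem_toFinset, hperm.mem_iff]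
  rw [foldl_zip_eq_adjCount, adjCount_of_sorted s hsorted, hupd, length_ofList_eq_card,
      hperm.length_eq, hfin]
  simp [hhl]
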